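-- pv_equiv track=rewrite | github.com/godelclaw/ai-agents | megalodon/ramsey36/gen_adj17_no6_full.py | gen_set_membership_term
-- ===== SOURCE A (Python) =====
-- def gen_set_string(subset):
--     return "{" + ", ".join(str(x) for x in sorted(subset)) + "}"
--
-- def gen_set_membership_term(elem, subset):
--     s = sorted(subset)
--     if len(s) == 2:
--         if elem == s[0]:
--             return f"(UPairI1 {s[0]} {s[1]})"
--         else:
--             return f"(UPairI2 {s[0]} {s[1]})"
--
--     last = s[-1]
--     rest = s[:-1]
--     rest_str = gen_set_string(rest)
--     last_set_str = f"{{{last}}}"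
--
--     if elem == last:
--         # binunionI2 X Y z H
--         return f"(binunionI2 {rest_str} {last_set_str} {last} (SingI {last}))"
--     else:
--         # binunionI1 X Y z H
--         H = gen_set_membership_term(elem, rest)
--         return f"(binunionI1 {rest_str} {last_set_str} {elem} {H})"
-- ===== SOURCE B (Python) =====
-- def gen_set_membership_term(elem, subset):
--     s = sorted(subset)
--     n = len(s)
--     layers = []
--     while n != 2 and elem != s[n - 1]:
--         layers.append(("{" + ", ".join(str(x) for x in s[:n - 1]) + "}",
--                        "{" + str(s[n - 1]) + "}"))
--         n -= 1
--     if n == 2: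
--         if elem == s[0]:
--             term = f"(UPairI1 {s[0]} {s[1]})"
--         else:
--             term = f"(UPairI2 {s[0]} {s[1]})"
--     else:
--         rest_str = "{" + ", ".join(str(x) for x in s[:n - 1]) + "}"
--         term = f"(binunionI2 {rest_str} {{{s[n-1]}}} {s[n-1]} (SingI {s[n-1]}))"
--     for rest_str, last_set in reversed(layers):
--         term = f"(binunionI1 {rest_str} {last_set} {elem} {term})"
--     return term
-- ===== Notes on version B (the rewrite author's own statement) =====
-- stated objective: alternative
-- what changed: Replaces A's self-recursion (which re-sorts and re-slices the list at every level) by a single explicit loop over a shrinking prefix size n that collects the binunionI1 wrapper layers in a list and then folds them back in reverse around the base term.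
-- outside the precondition, e.g. on gen_set_membership_term(2, []): A raises IndexError, B raises IndexError; on gen_set_membership_term(2, [3]): A raises IndexError, B raises IndexError
import Mathlib
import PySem

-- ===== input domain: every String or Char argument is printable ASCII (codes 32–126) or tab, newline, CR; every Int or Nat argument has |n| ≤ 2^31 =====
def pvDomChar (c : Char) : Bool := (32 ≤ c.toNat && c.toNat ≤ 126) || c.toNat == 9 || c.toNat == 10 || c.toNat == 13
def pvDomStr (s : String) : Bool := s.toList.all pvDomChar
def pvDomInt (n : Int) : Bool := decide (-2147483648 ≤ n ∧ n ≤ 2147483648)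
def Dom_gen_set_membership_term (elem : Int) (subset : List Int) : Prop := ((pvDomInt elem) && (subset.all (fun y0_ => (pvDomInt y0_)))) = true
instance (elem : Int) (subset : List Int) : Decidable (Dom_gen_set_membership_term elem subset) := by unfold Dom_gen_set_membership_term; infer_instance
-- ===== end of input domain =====

-- B replaces A's recursion by a single explicit loop over a shrinking prefix size that collects
-- wrapper layers and folds them back in reverse (objective: alternative decomposition, same cost).

-- ===== PORT A =====
def gen_set_string (subset : List Int) : String :=
  "{" ++ PySem.Str.join ", " ((PySem.List.sorted subset (fun x => x)).map PySem.Int.toStr) ++ "}"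

def gen_set_membership_term (elem : Int) (subset : List Int) : String :=
  let s := PySem.List.sorted subset (fun x => x)
  if s.length = 2 then
    if elem = PySem.List.pyGetD s 0 0 then
      "(UPairI1 " ++ PySem.Int.toStr (PySem.List.pyGetD s 0 0) ++ " " ++ PySem.Int.toStr (PySem.List.pyGetD s 1 0) ++ ")"
    else
      "(UPairI2 " ++ PySem.Int.toStr (PySem.List.pyGetD s 0 0) ++ " " ++ PySem.Int.toStr (PySem.List.pyGetD s 1 0) ++ ")"
  else
    match hlast : PySem.List.pyGet? s (-1) with
    | none => ""   -- Python raises IndexError here (subset = []); excluded by Pre_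
    | some last =>
      let rest := PySem.List.slice s none (some (-1))
      let rest_str := gen_set_string rest
      let last_set_str := "{" ++ PySem.Int.toStr last ++ "}"
      if elem = last then
        "(binunionI2 " ++ rest_str ++ " " ++ last_set_str ++ " " ++ PySem.Int.toStr last ++ " (SingI " ++ PySem.Int.toStr last ++ "))"
      else
        "(binunionI1 " ++ rest_str ++ " " ++ last_set_str ++ " " ++ PySem.Int.toStr elem ++ " " ++ gen_set_membership_term elem rest ++ ")"
termination_by subset.length
decreasing_by
  have hne : s ≠ [] := by
    intro h
    rw [h] at hlast
    simp [PySem.List.pyGet?] at hlast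
  have hlen := PySem.List.length_sorted subset (fun x => x) false
  simp only [PySem.List.slice_to_neg_one, List.length_dropLast, hlen]
  have h0 : subset.length ≠ 0 := by
    intro h
    exact hne (List.eq_nil_of_length_eq_zero (hlen.trans h))
  omega

-- ===== PORT B =====
def pvSetStr (xs : List Int) : String :=
  "{" ++ PySem.Str.join ", " (xs.map PySem.Int.toStr) ++ "}"

def pvWrap (elem : Int) (term : String) (p : String × String) : String :=
  "(binunionI1 " ++ p.1 ++ " " ++ p.2 ++ " " ++ PySem.Int.toStr elem ++ " " ++ term ++ ")"

-- the while-loop of B: current size n, collected layers; counter 0 is unreachable under Pre_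
def pvLoopB (elem : Int) (s : List Int) : Nat → List (String × String) → Nat × List (String × String)
  | 0, layers => (0, layers)
  | m + 1, layers =>
    if m + 1 ≠ 2 ∧ elem ≠ PySem.List.pyGetD s ((m : Int) + 1 - 1) 0 then
      pvLoopB elem s m (layers ++ [(pvSetStr (PySem.List.slice s none (some ((m : Int) + 1 - 1))),
        "{" ++ PySem.Int.toStr (PySem.List.pyGetD s ((m : Int) + 1 - 1) 0) ++ "}")])
    else (m + 1, layers)

def pvBase (elem : Int) (s : List Int) (n : Nat) : String :=
  if n = 2 then
    if elem = PySem.List.pyGetD s 0 0 then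
      "(UPairI1 " ++ PySem.Int.toStr (PySem.List.pyGetD s 0 0) ++ " " ++ PySem.Int.toStr (PySem.List.pyGetD s 1 0) ++ ")"
    else
      "(UPairI2 " ++ PySem.Int.toStr (PySem.List.pyGetD s 0 0) ++ " " ++ PySem.Int.toStr (PySem.List.pyGetD s 1 0) ++ ")"
  else
    let last := PySem.List.pyGetD s ((n : Int) - 1) 0
    "(binunionI2 " ++ pvSetStr (PySem.List.slice s none (some ((n : Int) - 1))) ++ " " ++
      ("{" ++ PySem.Int.toStr last ++ "}") ++ " " ++ PySem.Int.toStr last ++ " (SingI " ++ PySem.Int.toStr last ++ "))"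

def gen_set_membership_term_alt (elem : Int) (subset : List Int) : String :=
  let s := PySem.List.sorted subset (fun x => x)
  let r := pvLoopB elem s s.length []
  (r.2.reverse).foldl (pvWrap elem) (pvBase elem s r.1)

-- ===== PRECONDITION & SPEC =====
-- Pre_ excludes exactly the inputs where Python A raises IndexError: the empty list, and a
-- one-element list whose element is not elem.
def Pre_gen_set_membership_term (elem : Int) (subset : List Int) : Prop :=
  2 ≤ subset.length ∨ (subset.length = 1 ∧ elem ∈ subset)
instance (elem : Int) (subset : List Int) : Decidable (Pre_gen_set_membership_term elem subset) := by
  unfold Pre_gen_set_membership_term; infer_instance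

def pvWitness_gen_set_membership_term : Int × List Int := (2, [1, 3, 2, 5])

def Spec_gen_set_membership_term (elem : Int) (subset : List Int) (out : String) : Prop := out = gen_set_membership_term_alt elem subset
instance (elem : Int) (subset : List Int) (out : String) : Decidable (Spec_gen_set_membership_term elem subset out) := by unfold Spec_gen_set_membership_term; infer_instance

-- ===== CLAIM (what is proved, stated in full; the proofs are below) =====
def Claim_equal_gen_set_membership_term : Prop := ∀ (elem : Int) (subset : List Int), Dom_gen_set_membership_term elem subset → Pre_gen_set_membership_term elem subset → Spec_gen_set_membership_term elem subset (gen_set_membership_term elem subset)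

-- ===== LEMMAS AND PROOFS =====

theorem pv_sorted_take (s : List Int) (hs : PySem.List.sorted s (fun x => x) = s) (m : Nat) :
    PySem.List.sorted (s.take m) (fun x => x) = s.take m := by
  apply PySem.List.sorted_eq_self_of_pairwise
  have hp := PySem.List.sorted_pairwise s (fun x => x)
  rw [hs] at hp
  exact hp.sublist (List.take_sublist m s)

theorem pv_gss (xs : List Int) (h : PySem.List.sorted xs (fun x => x) = xs) :
    gen_set_string xs = pvSetStr xs := by
  simp [gen_set_string, pvSetStr, h]

theorem pv_len_take (s : List Int) (n : Nat) (h : n ≤ s.length) : (s.take n).length = n := by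
  simp [List.length_take, Nat.min_eq_left h]

theorem pv_getLast?_take (s : List Int) (n : Nat) (h1 : 1 ≤ n) (h2 : n ≤ s.length) :
    (s.take n).getLast? = some (s.getD (n - 1) 0) := by
  rw [List.getLast?_eq_getElem?, pv_len_take s n h2]
  have hlt : n - 1 < s.length := by omega
  rw [List.getElem?_take, if_pos (by omega : n - 1 < n), List.getElem?_eq_getElem hlt,
    List.getD_eq_getElem s 0 hlt]

theorem pv_dropLast_take (s : List Int) (n : Nat) (h : n ≤ s.length) :
    (s.take n).dropLast = s.take (n - 1) := by
  rcases Nat.lt_or_ge n s.length with hlt | hge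
  · exact List.dropLast_take hlt
  · have he : n = s.length := le_antisymm h hge
    subst he
    rw [List.take_length, List.dropLast_eq_take]

theorem pv_loop_acc (elem : Int) (s : List Int) (m : Nat) (layers : List (String × String)) :
    pvLoopB elem s m layers = ((pvLoopB elem s m []).1, layers ++ (pvLoopB elem s m []).2) := by
  induction m generalizing layers with
  | zero => simp [pvLoopB]
  | succ m ih =>
    rw [pvLoopB, pvLoopB]
    split_ifs with h
    · rw [ih, ih ([] ++ [_])]
      simp
    · simp

-- A's value at a prefix where B's loop stops
theorem pv_stop (elem : Int) (s : List Int) (hs : PySem.List.sorted s (fun x => x) = s)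
    (n : Nat) (h1 : 1 ≤ n) (hlen : n ≤ s.length)
    (hc : n = 2 ∨ elem = s.getD (n - 1) 0) :
    pvBase elem s n = gen_set_membership_term elem (s.take n) := by
  have hlt : (s.take n).length = n := pv_len_take s n hlen
  rw [gen_set_membership_term.eq_def]
  simp only [pv_sorted_take s hs n, hlt]
  by_cases h2 : n = 2
  · subst h2
    rw [if_pos rfl]
    have e0 : PySem.List.pyGetD (List.take 2 s) 0 0 = PySem.List.pyGetD s 0 0 := by
      rw [PySem.List.pyGetD_eq_getElem _ _ (by norm_num) (by rw [hlt]; norm_num),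
        PySem.List.pyGetD_eq_getElem _ _ (by norm_num) (by exact_mod_cast by omega)]
      simp [List.getElem_take]
    have e1 : PySem.List.pyGetD (List.take 2 s) 1 0 = PySem.List.pyGetD s 1 0 := by
      rw [PySem.List.pyGetD_eq_getElem _ _ (by norm_num) (by rw [hlt]; norm_num),
        PySem.List.pyGetD_eq_getElem _ _ (by norm_num) (by exact_mod_cast by omega)]
      simp [List.getElem_take]
    simp [pvBase, e0, e1]
  · have helem : elem = s.getD (n - 1) 0 := hc.resolve_left h2
    rw [if_neg h2]
    have hget : PySem.List.pyGet? (s.take n) (-1) = some (s.getD (n - 1) 0) := by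
      rw [PySem.List.pyGet?_neg_one, pv_getLast?_take s n h1 hlen]
    split
    case h_1 h =>
      rw [pv_sorted_take s hs n, hget] at h
      simp at h
    case h_2 last h =>
      rw [pv_sorted_take s hs n, hget] at h
      injection h with h
      subst h
      rw [if_pos helem]
      simp only [PySem.List.slice_to_neg_one, pv_dropLast_take s n hlen]
      rw [pv_gss _ (pv_sorted_take s hs (n - 1))]
      simp only [pvBase, if_neg h2]
      have hcast : ((n : Int) - 1) = ((n - 1 : Nat) : Int) := by omega
      rw [hcast, PySem.List.pyGetD_natCast, PySem.List.slice_to _ (by omega : (0:Int) ≤ ((n - 1 : Nat) : Int))]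
      simp

-- A's unfolding at a prefix where B's loop continues
theorem pv_step (elem : Int) (s : List Int) (hs : PySem.List.sorted s (fun x => x) = s)
    (n : Nat) (h3 : 3 ≤ n) (hlen : n ≤ s.length) (hne : elem ≠ s.getD (n - 1) 0) :
    gen_set_membership_term elem (s.take n)
      = pvWrap elem (gen_set_membership_term elem (s.take (n - 1)))
          (pvSetStr (s.take (n - 1)), "{" ++ PySem.Int.toStr (s.getD (n - 1) 0) ++ "}") := by
  have hlt : (s.take n).length = n := pv_len_take s n hlen
  rw [gen_set_membership_term.eq_def]
  simp only [pv_sorted_take s hs n, hlt]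
  rw [if_neg (by omega : ¬ n = 2)]
  have hget : PySem.List.pyGet? (s.take n) (-1) = some (s.getD (n - 1) 0) := by
    rw [PySem.List.pyGet?_neg_one, pv_getLast?_take s n (by omega) hlen]
  split
  case h_1 h =>
    rw [pv_sorted_take s hs n, hget] at h
    simp at h
  case h_2 last h =>
    rw [pv_sorted_take s hs n, hget] at h
    injection h with h
    subst h
    rw [if_neg hne]
    simp only [PySem.List.slice_to_neg_one, pv_dropLast_take s n hlen]
    rw [pv_gss _ (pv_sorted_take s hs (n - 1))]
    simp [pvWrap]

theorem pv_key (elem : Int) (s : List Int) (hs : PySem.List.sorted s (fun x => x) = s) :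
    ∀ m : Nat, (2 ≤ m ∧ m ≤ s.length) ∨ (m = 1 ∧ 1 ≤ s.length ∧ elem = s.getD 0 0) →
      ((pvLoopB elem s m []).2.reverse).foldl (pvWrap elem) (pvBase elem s (pvLoopB elem s m []).1)
        = gen_set_membership_term elem (s.take m) := by
  intro m
  induction m with
  | zero => rintro (⟨h, _⟩ | ⟨h, _⟩) <;> omega
  | succ m ih =>
    intro hm
    have hlen : m + 1 ≤ s.length := by rcases hm with ⟨_, h⟩ | ⟨h, hl, _⟩ <;> omega
    have hidx : ((m : Int) + 1 - 1) = ((m : Nat) : Int) := by ring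
    have hgd : PySem.List.pyGetD s ((m : Int) + 1 - 1) 0 = s.getD m 0 := by
      rw [hidx, PySem.List.pyGetD_natCast]
    by_cases hstop : m + 1 = 2 ∨ elem = s.getD m 0
    · have hloop : pvLoopB elem s (m + 1) [] = (m + 1, []) := by
        rw [pvLoopB, if_neg]
        intro hcon
        exact hcon.2 (by rw [hgd]; exact hstop.resolve_left hcon.1)
      rw [hloop]
      simp only [List.reverse_nil, List.foldl_nil]
      apply pv_stop elem s hs (m + 1) (by omega) hlen
      rcases hstop with h | h
      · exact Or.inl h
      · exact Or.inr (by simpa using h)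
    · rw [not_or] at hstop
      obtain ⟨hne2, hneel⟩ := hstop
      have hm2 : 2 ≤ m + 1 := by
        rcases hm with ⟨h, _⟩ | ⟨h, hl, he⟩
        · omega
        · exfalso
          apply hneel
          have hm0 : m = 0 := by omega
          subst hm0
          simpa [PySem.List.pyGetD_zero] using he
      have hL : pvLoopB elem s (m + 1) []
          = ((pvLoopB elem s m []).1,
             [(pvSetStr (PySem.List.slice s none (some ((m : Int) + 1 - 1))),
               "{" ++ PySem.Int.toStr (PySem.List.pyGetD s ((m : Int) + 1 - 1) 0) ++ "}")]
               ++ (pvLoopB elem s m []).2) := by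
        rw [pvLoopB, if_pos ⟨by omega, by rw [hgd]; exact hneel⟩, pv_loop_acc]
        simp
      rw [hL]
      simp only [List.reverse_append, List.reverse_singleton, List.foldl_append, List.foldl_cons,
        List.foldl_nil]
      rw [hgd, hidx, PySem.List.slice_to s (by positivity : (0:Int) ≤ ((m : Nat) : Int))]
      rw [pv_step elem s hs (m + 1) (by omega) hlen (by simpa using hneel)]
      simp [pvWrap, ih (Or.inl ⟨by omega, by omega⟩)]


-- ===== VERDICT (by name: the statement is the Claim_ definition above) =====
theorem pv_A_sorted (elem : Int) (subset : List Int) :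
    gen_set_membership_term elem subset
      = gen_set_membership_term elem (PySem.List.sorted subset (fun x => x)) := by
  conv_rhs => rw [gen_set_membership_term.eq_def]
  rw [gen_set_membership_term.eq_def, PySem.List.sorted_sorted]

theorem gen_set_membership_term_spec : Claim_equal_gen_set_membership_term := by
  unfold Claim_equal_gen_set_membership_term
  intro elem subset _ hpre
  unfold Spec_gen_set_membership_term
  have hs := PySem.List.sorted_sorted subset (fun x => x)
  have hlen := PySem.List.length_sorted subset (fun x => x) false
  have hcond : (2 ≤ (PySem.List.sorted subset (fun x => x)).length ∧
        (PySem.List.sorted subset (fun x => x)).length ≤ (PySem.List.sorted subset (fun x => x)).length) ∨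
      ((PySem.List.sorted subset (fun x => x)).length = 1 ∧
        1 ≤ (PySem.List.sorted subset (fun x => x)).length ∧
        elem = (PySem.List.sorted subset (fun x => x)).getD 0 0) := ?_
  case _ =>
    have hkey2 := pv_key elem (PySem.List.sorted subset (fun x => x)) hs
        (PySem.List.sorted subset (fun x => x)).length hcond
    rw [List.take_length] at hkey2
    rw [pv_A_sorted]
    exact hkey2.symm
  rcases hpre with h2 | ⟨h1, hmem⟩
  · exact Or.inl ⟨by omega, le_refl _⟩
  · right
    refine ⟨by omega, by omega, ?_⟩
    have hm : elem ∈ PySem.List.sorted subset (fun x => x) := by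
      rw [PySem.List.mem_sorted]; exact hmem
    have hl1 : (PySem.List.sorted subset (fun x => x)).length = 1 := by omega
    rcases List.length_eq_one_iff.mp hl1 with ⟨a, ha⟩
    rw [ha] at hm ⊢
    simp at hm
    simp [hm]
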